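-- pv_equiv track=rewrite | github.com/chunblam/slay_the_spire_2_rl | llm_advisor.py | _lookup_card
-- ===== SOURCE A (Python) =====
-- from typing import Dict, List, Optional, Tuple
--
-- def _lookup_card(name_or_id: str, cards_db: Dict) -> Optional[Dict]:
--     """
--     从 Codex cards 字典里匹配一张卡。
--     先精确匹配 id，再精确匹配 name，最后做不区分大小写的 name 模糊匹配。
--     """
--     if not name_or_id or not cards_db:
--         return None
--     # 1. id 精确
--     if name_or_id in cards_db:
--         return cards_db[name_or_id]
--     # 2. name 精确
--     for v in cards_db.values():
--         if v.get("name", "") == name_or_id: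
--             return v
--     # 3. 忽略大小写 + 去掉升级符号
--     name_lower = name_or_id.lower().rstrip("+")
--     for v in cards_db.values():
--         if v.get("name", "").lower() == name_lower:
--             return v
--     return None
-- ===== SOURCE B (Python) =====
-- def _lookup_card(name_or_id: str, cards_db: dict):
--     if not name_or_id or not cards_db:
--         return None
--     if name_or_id in cards_db:
--         return cards_db[name_or_id]
--     name_lower = name_or_id.lower().rstrip("+")
--     fuzzy = None
--     for v in cards_db.values():
--         nm = v.get("name", "")
--         if nm == name_or_id:
--             return v
--         if fuzzy is None and nm.lower() == name_lower:
--             fuzzy = v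
--     return fuzzy
-- ===== Notes on version B (the rewrite author's own statement) =====
-- stated objective: simpler
-- what changed: The two separate scans over cards_db.values() (exact-name scan, then a second case-insensitive scan) are folded into ONE pass that returns immediately on an exact name match and carries the first case-insensitive candidate as a fallback, computing each value's name and its lowercase form once.
import Mathlib
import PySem

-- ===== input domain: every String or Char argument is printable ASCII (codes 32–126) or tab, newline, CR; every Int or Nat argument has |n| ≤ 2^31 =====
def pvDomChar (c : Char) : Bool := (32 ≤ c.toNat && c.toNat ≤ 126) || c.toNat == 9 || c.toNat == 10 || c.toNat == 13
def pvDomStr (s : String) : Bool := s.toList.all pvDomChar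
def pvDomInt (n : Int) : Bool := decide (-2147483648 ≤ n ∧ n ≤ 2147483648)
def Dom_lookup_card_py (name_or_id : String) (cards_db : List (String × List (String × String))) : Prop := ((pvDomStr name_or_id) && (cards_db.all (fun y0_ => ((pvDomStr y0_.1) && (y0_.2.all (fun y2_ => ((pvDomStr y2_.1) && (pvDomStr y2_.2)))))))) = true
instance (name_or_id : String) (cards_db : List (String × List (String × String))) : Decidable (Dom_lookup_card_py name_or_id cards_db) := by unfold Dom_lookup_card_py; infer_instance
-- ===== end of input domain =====

-- B folds A's two separate scans over the card values into one pass that carries the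
-- first case-insensitive candidate as a fallback while still returning an exact-name
-- match immediately (objective: simpler, single pass).


-- ===== PORT A =====
-- v.get("name", "")
def getNameD (v : List (String × String)) : String := PySem.Dict.getD (PySem.Dict.mk v) "name" ""
-- s.rstrip("+") : hand port (PySem has no one-sided rstrip-with-chars); exact for the
-- single strip character '+': drop trailing '+' characters.
def rstripPlus (s : String) : String := String.ofList ((s.toList.reverse.dropWhile (· == '+')).reverse)

def lookup_card_py (name_or_id : String) (cards_db : List (String × List (String × String))) : Option (List (String × String)) :=
  if name_or_id = "" || cards_db = [] then none
  else
    let db := PySem.Dict.mk cards_db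
    if db.contains name_or_id then db.get? name_or_id
    else
      match db.values.find? (fun v => getNameD v == name_or_id) with
      | some v => some v
      | none =>
        let name_lower := rstripPlus (PySem.Str.lower name_or_id)
        match db.values.find? (fun v => PySem.Str.lower (getNameD v) == name_lower) with
        | some v => some v
        | none => none

-- ===== PORT B =====
-- the single pass of Source B: exact name returns at once; first case-insensitive hit is kept
def lookupScan (name_or_id name_lower : String) (fuzzy : Option (List (String × String))) :
    List (List (String × String)) → Option (List (String × String))
  | [] => fuzzy
  | v :: rest =>
    let nm := getNameD v
    if nm == name_or_id then some v
    else lookupScan name_or_id name_lower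
      (if fuzzy.isNone && (PySem.Str.lower nm == name_lower) then some v else fuzzy) rest

def lookup_card_py_alt (name_or_id : String) (cards_db : List (String × List (String × String))) : Option (List (String × String)) :=
  if name_or_id = "" || cards_db = [] then none
  else
    let db := PySem.Dict.mk cards_db
    if db.contains name_or_id then db.get? name_or_id
    else lookupScan name_or_id (rstripPlus (PySem.Str.lower name_or_id)) none db.values

-- ===== PRECONDITION & SPEC =====
def Spec_lookup_card_py (name_or_id : String) (cards_db : List (String × List (String × String))) (out : Option (List (String × String))) : Prop := out = lookup_card_py_alt name_or_id cards_db
instance (name_or_id : String) (cards_db : List (String × List (String × String))) (out : Option (List (String × String))) : Decidable (Spec_lookup_card_py name_or_id cards_db out) := by unfold Spec_lookup_card_py; infer_instance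

-- ===== CLAIM (what is proved, stated in full; the proofs are below) =====
def Claim_equal_lookup_card_py : Prop := ∀ (name_or_id : String) (cards_db : List (String × List (String × String))), Dom_lookup_card_py name_or_id cards_db → Spec_lookup_card_py name_or_id cards_db (lookup_card_py name_or_id cards_db)

-- ===== LEMMAS AND PROOFS =====

-- the single pass equals: exact-name find?, else the fallback, else the fuzzy find?
theorem lookupScan_eq (n nl : String) (vs : List (List (String × String)))
    (fz : Option (List (String × String))) :
    lookupScan n nl fz vs =
      match vs.find? (fun v => getNameD v == n) with
      | some v => some v
      | none => fz.orElse (fun _ => vs.find? (fun v => PySem.Str.lower (getNameD v) == nl)) := by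
  induction vs generalizing fz with
  | nil => simp [lookupScan]
  | cons v rest ih =>
    simp only [lookupScan, List.find?]
    by_cases h : (getNameD v == n) = true
    · simp [h]
    · simp only [Bool.not_eq_true] at h
      rw [ih]
      simp only [h, Bool.false_eq_true, if_false]
      cases hf : rest.find? (fun v => getNameD v == n) with
      | some w => simp
      | none =>
        cases fz with
        | some f => simp [Option.orElse]
        | none =>
          by_cases h2 : (PySem.Str.lower (getNameD v) == nl) = true
          · simp [h2, Option.orElse]
          · simp only [Bool.not_eq_true] at h2
            simp [h2, Option.orElse]

-- ===== VERDICT (by name: the statement is the Claim_ definition above) =====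
theorem lookup_card_py_spec : Claim_equal_lookup_card_py := by
  intro n db _
  unfold Spec_lookup_card_py lookup_card_py lookup_card_py_alt
  by_cases h0 : (n = "" || db = []) = true
  · simp [h0]
  · simp only [h0, Bool.false_eq_true, if_false]
    by_cases hc : (PySem.Dict.mk db).contains n = true
    · simp [hc]
    · simp only [Bool.not_eq_true] at hc
      rw [lookupScan_eq]
      simp only [hc, Bool.false_eq_true, if_false, PySem.Dict.values, PySem.Dict.get?,
        List.find?_map, Option.orElse]
      cases Option.map (fun x => x.2) (List.find? ((fun v => getNameD v == n) ∘ fun x => x.2) db) <;>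
        cases Option.map (fun x => x.2)
          (List.find? ((fun v => PySem.Str.lower (getNameD v) == rstripPlus (PySem.Str.lower n)) ∘ fun x => x.2) db) <;>
        simp
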